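-- pv_equiv track=rewrite | github.com/ZerotakerZX/Python | TestFormulas/operators.py | task570
-- ===== SOURCE A (Python) =====
-- def task570(time_elapsed, cells):
--     cells_log = []  # список куда будет записано число клеток в контрольные часы
--     start = time_elapsed[0]  # найти стартый подсчёта клеток после деления
--     end = time_elapsed[-1] + 1  # правильный момент для остановки
--     step = time_elapsed[1] - time_elapsed[0]  # найти размер шага между контрольными часами
--     for i in range(start, end, step):  # правильный цикл деления клеток по часам
--         while (i % step) == 0:  # чтобы знать когда контрольный час пробил
--             cells = cells * 2  # формула деления клеток
--             cells_log.append(cells)  # запись клеток по часам в специальный лог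
--             break
--     result = cells_log
--     return result
-- ===== SOURCE B (Python) =====
-- def task570(time_elapsed, cells):
--     start = time_elapsed[0]
--     end = time_elapsed[-1] + 1
--     step = time_elapsed[1] - time_elapsed[0]
--     if start % step != 0:
--         return []
--     n = len(range(start, end, step))
--     return [cells * 2 ** (k + 1) for k in range(n)]
-- ===== Notes on version B (the rewrite author's own statement) =====
-- stated objective: alternative
-- what changed: Replaces A's stateful range scan with a per-element modulo while/break and a mutated cells accumulator by a closed-form comprehension: check divisibility of start once, count the range, and produce [cells * 2**(k+1) for k in range(n)] directly from the index.
import Mathlib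
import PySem

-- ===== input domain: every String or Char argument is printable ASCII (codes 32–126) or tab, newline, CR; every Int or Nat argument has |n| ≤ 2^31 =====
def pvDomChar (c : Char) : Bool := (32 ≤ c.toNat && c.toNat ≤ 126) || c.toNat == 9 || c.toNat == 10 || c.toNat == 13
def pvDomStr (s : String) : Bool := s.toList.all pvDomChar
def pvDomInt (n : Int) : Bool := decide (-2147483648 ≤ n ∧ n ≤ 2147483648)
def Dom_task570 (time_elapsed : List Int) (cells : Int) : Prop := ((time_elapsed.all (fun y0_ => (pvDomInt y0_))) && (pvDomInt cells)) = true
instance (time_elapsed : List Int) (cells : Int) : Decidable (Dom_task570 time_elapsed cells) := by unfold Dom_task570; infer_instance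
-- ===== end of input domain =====

-- B replaces A's stateful scan (range loop, per-element modulo while/break, mutated
-- cells accumulator) by one upfront divisibility check and a closed-form
-- comprehension cells * 2^(k+1) over the indices; same results.

-- ===== PORT A =====
def task570 (time_elapsed : List Int) (cells : Int) : List Int :=
  match PySem.List.pyGet? time_elapsed 0, PySem.List.pyGet? time_elapsed (-1),
        PySem.List.pyGet? time_elapsed 1 with
  | some start, some last, some t1 =>
    let step := t1 - start
    -- the Python list.append loop, ported as the standard cons-accumulator + final reverse
    (((PySem.List.pyRange start (last + 1) step).foldl
      (fun (st : List Int × Int) i =>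
        if PySem.Int.mod i step = 0 then (st.2 * 2 :: st.1, st.2 * 2) else st)
      ([], cells)).1).reverse
  | _, _, _ => []

-- ===== PORT B =====
def task570_alt (time_elapsed : List Int) (cells : Int) : List Int :=
  match PySem.List.pyGet? time_elapsed 0 with
  | none => []
  | some start =>
    match PySem.List.pyGet? time_elapsed (-1) with
    | none => []
    | some last =>
      match PySem.List.pyGet? time_elapsed 1 with
      | none => []
      | some t1 =>
        let step := t1 - start
        if PySem.Int.mod start step ≠ 0 then []
        else
          let n := (PySem.List.pyRange start (last + 1) step).length
          (List.range n).map (fun k => cells * 2 ^ (k + 1))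

-- ===== PRECONDITION & SPEC =====
-- Pre_ excludes exactly the inputs where Python A raises: lists shorter than 2
-- (IndexError) and a zero step (range(..., 0) raises ValueError).
def Pre_task570 (time_elapsed : List Int) (cells : Int) : Prop :=
  2 ≤ time_elapsed.length ∧ time_elapsed.getD 1 0 ≠ time_elapsed.getD 0 0
instance (time_elapsed : List Int) (cells : Int) : Decidable (Pre_task570 time_elapsed cells) := by unfold Pre_task570; infer_instance
def pvWitness_task570 : List Int × Int := ([0, 3, 6], 1)

def Spec_task570 (time_elapsed : List Int) (cells : Int) (out : List Int) : Prop := out = task570_alt time_elapsed cells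
instance (time_elapsed : List Int) (cells : Int) (out : List Int) : Decidable (Spec_task570 time_elapsed cells out) := by unfold Spec_task570; infer_instance

-- ===== CLAIM (what is proved, stated in full; the proofs are below) =====
def Claim_equal_task570 : Prop := ∀ (time_elapsed : List Int) (cells : Int), Dom_task570 time_elapsed cells → Pre_task570 time_elapsed cells → Spec_task570 time_elapsed cells (task570 time_elapsed cells)

-- ===== LEMMAS AND PROOFS =====

-- every element of pyRange s b step has the form s + step * k
theorem mem_pyRange_shape (s b step x : Int) (hx : x ∈ PySem.List.pyRange s b step) :
    ∃ k : Nat, x = s + step * k := by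
  unfold PySem.List.pyRange at hx
  split at hx
  · simp at hx
  · simp only [List.mem_map, List.mem_range] at hx
    obtain ⟨k, _, hk⟩ := hx
    exact ⟨k, hk.symm⟩

theorem foldl_all_mod_zero (step : Int) (l : List Int)
    (h : ∀ i ∈ l, PySem.Int.mod i step = 0) (acc : List Int) (c : Int) :
    (l.foldl
      (fun (st : List Int × Int) i =>
        if PySem.Int.mod i step = 0 then (st.2 * 2 :: st.1, st.2 * 2) else st)
      (acc, c)) = (((List.range l.length).map (fun k => c * 2 ^ (k + 1))).reverse ++ acc, c * 2 ^ l.length) := by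
  induction l generalizing acc c with
  | nil => simp
  | cons a t ih =>
    simp only [List.foldl_cons, h a (by simp), if_true]
    rw [ih (fun i hi => h i (List.mem_cons_of_mem _ hi))]
    refine Prod.ext ?_ ?_
    · simp only [List.length_cons, List.range_succ_eq_map, List.map_cons, List.map_map,
        List.reverse_cons, List.append_assoc, List.singleton_append]
      congr 1
      · apply congrArg
        apply List.map_congr_left
        intro k _
        simp [Function.comp, pow_succ]
        ring
    · simp [pow_succ]; ring

theorem foldl_all_mod_ne (step : Int) (l : List Int)
    (h : ∀ i ∈ l, PySem.Int.mod i step ≠ 0) (acc : List Int) (c : Int) :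
    (l.foldl
      (fun (st : List Int × Int) i =>
        if PySem.Int.mod i step = 0 then (st.2 * 2 :: st.1, st.2 * 2) else st)
      (acc, c)) = (acc, c) := by
  induction l generalizing acc c with
  | nil => simp
  | cons a t ih =>
    simp only [List.foldl_cons, if_neg (h a (by simp))]
    exact ih (fun i hi => h i (List.mem_cons_of_mem _ hi)) acc c

-- ===== VERDICT (by name: the statement is the Claim_ definition above) =====
theorem task570_spec : Claim_equal_task570 := by
  intro te cells _ _
  unfold Spec_task570 task570 task570_alt
  cases h0 : PySem.List.pyGet? te 0 with
  | none => rfl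
  | some start =>
  cases h1 : PySem.List.pyGet? te (-1) with
  | none => rfl
  | some last =>
  cases h2 : PySem.List.pyGet? te 1 with
  | none => rfl
  | some t1 =>
  simp only []
  set step := t1 - start with hstep
  by_cases hd : PySem.Int.mod start step = 0
  · have hall : ∀ i ∈ PySem.List.pyRange start (last + 1) step,
        PySem.Int.mod i step = 0 := by
      intro i hi
      obtain ⟨k, rfl⟩ := mem_pyRange_shape start (last + 1) step i hi
      rw [PySem.Int.mod_eq_zero_iff_dvd] at hd ⊢
      exact dvd_add hd (Dvd.intro _ rfl)
    rw [foldl_all_mod_zero step _ hall]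
    simp [hd]
  · have hall : ∀ i ∈ PySem.List.pyRange start (last + 1) step,
        PySem.Int.mod i step ≠ 0 := by
      intro i hi hc
      obtain ⟨k, rfl⟩ := mem_pyRange_shape start (last + 1) step i hi
      rw [PySem.Int.mod_eq_zero_iff_dvd] at hc
      exact hd ((PySem.Int.mod_eq_zero_iff_dvd _ _).2
        ((dvd_add_right (Dvd.intro _ rfl)).1 (by rwa [add_comm] at hc)))
    rw [foldl_all_mod_ne step _ hall]
    simp [hd]
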